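-- pv_equiv track=rewrite | github.com/tkilla77/ksr_gf_informatik_1m | search_sort/name_tester.py | is_good_name
-- ===== SOURCE A (Python) =====
-- vowels = 'aeiou'
--
-- def is_good_name(name):
--     name = name.lower()
--     if name[-1] != 'a':
--         return False
--     vowel_expected = None
--     last = None
--     for ch in name:
--         if ch == last:
--             last = None
--             continue
--         last = ch
--         if vowel_expected is True and ch not in vowels:
--             return False
--         elif vowel_expected is False and ch in vowels:
--             return False
--         vowel_expected = not ch in vowels
--     return True
-- ===== SOURCE B (Python) =====
-- vowels = 'aeiou'
--
-- def is_good_name(name):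
--     name = name.lower()
--     if name[-1] != 'a':
--         return False
--     # pass 1: apply the double-skip rule only, producing the reduced sequence
--     reduced = []
--     last = None
--     for ch in name:
--         if ch == last:
--             last = None
--         else:
--             last = ch
--             reduced.append(ch)
--     # pass 2: consecutive reduced chars must alternate in vowel-ness
--     for i in range(1, len(reduced)):
--         if (reduced[i] in vowels) == (reduced[i - 1] in vowels):
--             return False
--     return True
-- ===== Notes on version B (the rewrite author's own statement) =====
-- stated objective: alternative
-- what changed: Single fused loop carrying vowel_expected state with early returns is split into two independent passes: one builds the double-collapsed reduced sequence, a second checks vowel/consonant alternation over adjacent pairs of it.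
import Mathlib
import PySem

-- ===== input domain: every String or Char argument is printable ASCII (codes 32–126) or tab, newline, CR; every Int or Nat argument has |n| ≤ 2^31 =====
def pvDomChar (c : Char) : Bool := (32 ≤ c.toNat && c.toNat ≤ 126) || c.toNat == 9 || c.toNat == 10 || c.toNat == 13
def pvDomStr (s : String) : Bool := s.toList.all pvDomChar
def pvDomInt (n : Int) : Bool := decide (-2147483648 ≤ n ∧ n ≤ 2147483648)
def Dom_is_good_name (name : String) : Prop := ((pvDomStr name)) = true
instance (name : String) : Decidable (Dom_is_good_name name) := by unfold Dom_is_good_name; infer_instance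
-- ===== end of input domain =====

-- B replaces A's single fused loop (alternation state + early returns) by two passes:
-- build the double-collapsed reduced sequence, then check alternation of adjacent pairs.

def pvVowels : List Char := ['a', 'e', 'i', 'o', 'u']

-- ===== PORT A =====
-- A's for-loop: state (vowel_expected, last), early returns on an alternation violation
def isGoodLoopA : Option Bool → Option Char → List Char → Bool
  | _, _, [] => true
  | ve, last, ch :: rest =>
    if some ch = last then
      isGoodLoopA ve none rest
    else
      if ve = some true ∧ ¬ pvVowels.contains ch then false
      else if ve = some false ∧ pvVowels.contains ch then false
      else isGoodLoopA (some (! pvVowels.contains ch)) (some ch) rest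

def is_good_name (name : String) : Bool :=
  let nm := PySem.Str.lower name
  match PySem.Str.pyGet? nm (-1) with
  | none => false   -- Python raises IndexError here (empty name); excluded by Pre_
  | some c => if c ≠ 'a' then false else isGoodLoopA none none nm.toList

-- ===== PORT B =====
-- pass 1: only the double-skip rule, producing the reduced sequence
def reducePass : Option Char → List Char → List Char
  | _, [] => []
  | last, ch :: rest =>
    if some ch = last then reducePass none rest
    else ch :: reducePass (some ch) rest

-- pass 2: adjacent reduced chars must differ in vowel-ness
def altPass : List Char → Bool
  | [] => true
  | [_] => true
  | a :: b :: rest =>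
    if pvVowels.contains b = pvVowels.contains a then false
    else altPass (b :: rest)

def is_good_name_alt (name : String) : Bool :=
  let nm := PySem.Str.lower name
  match PySem.Str.pyGet? nm (-1) with
  | none => false   -- Python raises IndexError here (empty name); excluded by Pre_
  | some c => if c ≠ 'a' then false else altPass (reducePass none nm.toList)

-- ===== PRECONDITION & SPEC =====
-- Pre_ excludes only the empty string, on which both A and B raise IndexError at name[-1].
def Pre_is_good_name (name : String) : Prop := name ≠ ""
instance (name : String) : Decidable (Pre_is_good_name name) := by unfold Pre_is_good_name; infer_instance
def pvWitness_is_good_name : String := ("ana")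

def Spec_is_good_name (name : String) (out : Bool) : Prop := out = is_good_name_alt name
instance (name : String) (out : Bool) : Decidable (Spec_is_good_name name out) := by unfold Spec_is_good_name; infer_instance

-- ===== CLAIM (what is proved, stated in full; the proofs are below) =====
def Claim_equal_is_good_name : Prop := ∀ (name : String), Dom_is_good_name name → Pre_is_good_name name → Spec_is_good_name name (is_good_name name)

-- ===== LEMMAS AND PROOFS =====

-- alternation check reformulated with A's vowel_expected state
def altAux : Option Bool → List Char → Bool
  | _, [] => true
  | ve, c :: rest =>
    if ve = some (! pvVowels.contains c) then false
    else altAux (some (! pvVowels.contains c)) rest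

theorem isGoodLoopA_eq_altAux_reduce (l : List Char) :
    ∀ (ve : Option Bool) (last : Option Char),
      isGoodLoopA ve last l = altAux ve (reducePass last l) := by
  induction l with
  | nil => intro ve last; rfl
  | cons ch rest ih =>
    intro ve last
    by_cases h : some ch = last
    · simp [isGoodLoopA, reducePass, h, ih]
    · simp only [isGoodLoopA, reducePass, if_neg h, altAux]
      by_cases hv : pvVowels.contains ch
      · rcases ve with _ | b
        · simp [ih]
        · cases b <;> simp [ih]
      · rcases ve with _ | b
        · simp [ih]
        · cases b <;> simp [ih]

theorem altAux_some_eq_altPass (l : List Char) :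
    ∀ (a : Char), altAux (some (! pvVowels.contains a)) l = altPass (a :: l) := by
  induction l with
  | nil => intro a; rfl
  | cons b rest ih =>
    intro a
    by_cases h : pvVowels.contains b = pvVowels.contains a
    · simp only [altAux, altPass]
      rw [if_pos h, if_pos (by rw [h])]
    · have h2 : ¬ (some (! pvVowels.contains a) = some (! pvVowels.contains b)) := by
        intro e
        exact h (Bool.not_inj (Option.some.inj e)).symm
      simp only [altAux, altPass]
      rw [if_neg h2, if_neg h]
      exact ih b

theorem altAux_none_eq_altPass (l : List Char) : altAux none l = altPass l := by
  cases l with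
  | nil => rfl
  | cons a rest =>
    simp only [altAux]
    rw [if_neg (by simp), altAux_some_eq_altPass]

-- ===== VERDICT (by name: the statement is the Claim_ definition above) =====
theorem is_good_name_spec : Claim_equal_is_good_name := by
  intro name _ _
  unfold Spec_is_good_name is_good_name is_good_name_alt
  simp only [isGoodLoopA_eq_altAux_reduce, altAux_none_eq_altPass]
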